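-- pv_equiv track=rewrite | github.com/DillonB07/upm | internal/backends/python/regression_tests/test.py | choose_module
-- ===== SOURCE A (Python) =====
-- def choose_module(pkg, modules):
--     best_score = 0
--     choosen = None
--     for mod in modules:
--         if mod == pkg:
--             return mod
--         score = 1 if mod.startswith("_") else 2
--         if score > best_score:
--             best_score = score
--             choosen = mod
--     return choosen
-- ===== SOURCE B (Python) =====
-- def choose_module(pkg, modules):
--     if pkg in modules:
--         return pkg
--     for mod in modules:
--         if not mod.startswith("_"):
--             return mod
--     return modules[0] if modules else None
-- ===== Notes on version B (the rewrite author's own statement) =====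
-- stated objective: simpler
-- what changed: Replaces the combined early-return + best-score-tracking loop with three plain steps: a C-level membership check for the exact match, a first-non-underscore scan that returns immediately, and a fall-back to the first module.
import Mathlib
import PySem

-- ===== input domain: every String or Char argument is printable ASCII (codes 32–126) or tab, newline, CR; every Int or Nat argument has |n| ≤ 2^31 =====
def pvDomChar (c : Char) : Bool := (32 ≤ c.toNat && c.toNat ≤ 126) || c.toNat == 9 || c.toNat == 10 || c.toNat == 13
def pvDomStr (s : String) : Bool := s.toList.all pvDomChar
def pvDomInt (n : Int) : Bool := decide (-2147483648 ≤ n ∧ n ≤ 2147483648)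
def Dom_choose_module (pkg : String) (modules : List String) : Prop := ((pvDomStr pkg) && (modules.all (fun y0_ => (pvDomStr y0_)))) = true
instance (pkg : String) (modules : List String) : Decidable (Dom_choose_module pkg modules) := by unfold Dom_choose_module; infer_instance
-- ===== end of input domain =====

-- B replaces A's combined early-return + best-score loop with three plain steps (membership check, first non-underscore, first element); same return value, simpler decomposition.


-- ===== PORT A =====
-- the loop over modules, carrying A's state (best_score, choosen); early `return mod` on exact match
def chooseLoopA (pkg : String) (best : Int) (chosen : Option String) : List String → Option String
  | [] => chosen
  | m :: ms =>
    if m == pkg then some m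
    else
      let score : Int := if PySem.Str.startswith m "_" then 1 else 2
      if score > best then chooseLoopA pkg score (some m) ms
      else chooseLoopA pkg best chosen ms

def choose_module (pkg : String) (modules : List String) : Option String :=
  chooseLoopA pkg 0 none modules

-- ===== PORT B =====
-- first module that does not start with "_" (B's second pass)
def firstNonUnderscore : List String → Option String
  | [] => none
  | m :: ms => if PySem.Str.startswith m "_" then firstNonUnderscore ms else some m

def choose_module_alt (pkg : String) (modules : List String) : Option String :=
  if modules.contains pkg then some pkg
  else
    match firstNonUnderscore modules with
    | some m => some m
    | none => modules.head?

-- ===== PRECONDITION & SPEC =====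
def Spec_choose_module (pkg : String) (modules : List String) (out : Option String) : Prop := out = choose_module_alt pkg modules
instance (pkg : String) (modules : List String) (out : Option String) : Decidable (Spec_choose_module pkg modules out) := by unfold Spec_choose_module; infer_instance

-- ===== CLAIM (what is proved, stated in full; the proofs are below) =====
def Claim_equal_choose_module : Prop := ∀ (pkg : String) (modules : List String), Dom_choose_module pkg modules → Spec_choose_module pkg modules (choose_module pkg modules)

-- ===== LEMMAS AND PROOFS =====

-- once best_score has reached 2, A's state never changes again: only an exact match can still return differently
theorem chooseLoopA_sat (pkg c : String) (ms : List String) :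
    chooseLoopA pkg 2 (some c) ms = if ms.contains pkg then some pkg else some c := by
  induction ms with
  | nil => simp [chooseLoopA]
  | cons m ms ih =>
    by_cases hm : m == pkg
    · have h : m = pkg := beq_iff_eq.mp hm
      subst h; simp [chooseLoopA, List.contains_cons]
    · have hne : pkg ≠ m := fun h => hm (beq_iff_eq.mpr h.symm)
      by_cases hu : PySem.Chars.startswith m.toList ['_'] = true <;>
        simp [chooseLoopA, hm, hne, hu, ih]

-- with best_score = 1 (chosen is an underscore-module), A returns pkg on a match, else the first non-underscore module, else chosen
theorem chooseLoopA_one (pkg c : String) (ms : List String) :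
    chooseLoopA pkg 1 (some c) ms =
      if ms.contains pkg then some pkg
      else match firstNonUnderscore ms with
           | some m => some m
           | none => some c := by
  induction ms with
  | nil => simp [chooseLoopA, firstNonUnderscore]
  | cons m ms ih =>
    by_cases hm : m == pkg
    · have h : m = pkg := beq_iff_eq.mp hm
      subst h; simp [chooseLoopA, List.contains_cons]
    · have hne : pkg ≠ m := fun h => hm (beq_iff_eq.mpr h.symm)
      by_cases hu : PySem.Chars.startswith m.toList ['_'] = true
      · simp [chooseLoopA, hm, hne, hu, firstNonUnderscore, ih]
      · simp [chooseLoopA, hm, hne, hu, firstNonUnderscore,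
              chooseLoopA_sat]

-- the initial state: A's whole loop equals B's three-step decomposition
theorem chooseLoopA_init (pkg : String) (ms : List String) :
    chooseLoopA pkg 0 none ms =
      if ms.contains pkg then some pkg
      else match firstNonUnderscore ms with
           | some m => some m
           | none => ms.head? := by
  cases ms with
  | nil => simp [chooseLoopA, firstNonUnderscore]
  | cons m ms =>
    by_cases hm : m == pkg
    · have h : m = pkg := beq_iff_eq.mp hm
      subst h; simp [chooseLoopA, List.contains_cons]
    · have hne : pkg ≠ m := fun h => hm (beq_iff_eq.mpr h.symm)
      by_cases hu : PySem.Chars.startswith m.toList ['_'] = true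
      · simp [chooseLoopA, hm, hne, hu, firstNonUnderscore,
              chooseLoopA_one]
      · simp [chooseLoopA, hm, hne, hu, firstNonUnderscore,
              chooseLoopA_sat]

-- ===== VERDICT (by name: the statement is the Claim_ definition above) =====
theorem choose_module_spec : Claim_equal_choose_module := by
  intro pkg modules _
  unfold Spec_choose_module choose_module choose_module_alt
  rw [chooseLoopA_init]
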